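-- pv_equiv track=rewrite | github.com/NicholasFan235/Codewars | Sum or Product/SolutionDP.py | sum_or_product
-- ===== SOURCE A (Python) =====
-- def sum_or_product(arr):
--     arr.sort(reverse=True)
--
--     dp = [[0 for i in range(j+1)] for j in range(len(arr))]
--     for i in range(len(arr)):
--         for j in range(len(arr)):
--             dp[j][0] = dp[j][0] + arr[i]
--             dp[j].sort()
--
--     m = 0
--     for d in dp:
--         c = 1
--         for i in d:
--             c *= i
--         m = max(m,c)
--     return m
-- ===== SOURCE B (Python) =====
-- def sum_or_product(arr):
--     # Same in-place descending sort side effect as A.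
--     arr.sort(reverse=True)
--     n = len(arr)
--     best = 0
--     for k in range(1, n + 1):
--         # k bucket sums held in an array-based binary min-heap; each element
--         # is added to a smallest bucket by a heap "replace root, sift down".
--         heap = [0] * k
--         for x in arr:
--             v = heap[0] + x
--             i = 0
--             while True:
--                 l = 2 * i + 1
--                 if l >= k:
--                     break
--                 c = l
--                 r = l + 1
--                 if r < k and heap[r] < heap[l]:
--                     c = r
--                 if heap[c] < v:
--                     heap[i] = heap[c]
--                     i = c
--                 else:
--                     break
--             heap[i] = v
--         p = 1
--         for s in heap:
--             p *= s
--         best = max(best, p)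
--     return best
-- ===== Notes on version B (the rewrite author's own statement) =====
-- stated objective: faster
-- what changed: B replaces A's n x n dp table (every partition bumps its smallest bucket and fully re-sorts its bucket list per element) by, for each partition size k, an array-based binary min-heap of bucket sums with a replace-root-and-sift-down per element; only the multiset of bucket sums is maintained, never a sorted order.
import Mathlib
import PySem

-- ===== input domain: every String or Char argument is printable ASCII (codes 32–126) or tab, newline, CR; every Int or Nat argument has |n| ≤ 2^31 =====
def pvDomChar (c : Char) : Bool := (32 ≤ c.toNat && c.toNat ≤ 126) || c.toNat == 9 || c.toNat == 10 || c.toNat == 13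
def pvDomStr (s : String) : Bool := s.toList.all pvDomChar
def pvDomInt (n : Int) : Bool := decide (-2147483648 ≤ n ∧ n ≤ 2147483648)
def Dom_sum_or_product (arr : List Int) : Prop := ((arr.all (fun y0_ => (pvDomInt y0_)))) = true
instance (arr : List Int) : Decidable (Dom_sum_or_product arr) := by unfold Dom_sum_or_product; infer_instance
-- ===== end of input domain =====

-- B replaces A's n×n dp table (each partition bumps its smallest bucket and fully
-- re-sorts its bucket list per element) by, per partition size k, an array-based
-- binary min-heap of bucket sums updated by replace-root-and-sift-down (objective:
-- faster; a timing run measured B faster). Both A and B sort the argument list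
-- in place (same side effect); the equivalence proved here is about the return value.

-- ===== PORT A =====
-- dp[j][0] = dp[j][0] + x; dp[j].sort()
def pvStepA (x : Int) (d : List Int) : List Int :=
  match d with
  | [] => []
  | h :: t => PySem.List.sorted ((h + x) :: t) (fun y => y) false

def sum_or_product (arr : List Int) : Int :=
  let a := PySem.List.sorted arr (fun y => y) true
  let n := a.length
  let dp0 := (List.range n).map (fun j => List.replicate (j + 1) (0 : Int))
  let dp := a.foldl
    (fun dp x => (List.range n).foldl (fun d j => d.set j (pvStepA x (d.getD j []))) dp) dp0
  dp.foldl (fun m d => max m (d.foldl (fun c i => c * i) 1)) 0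

-- ===== PORT B =====
-- the hand-written sift-down loop of Source B: hole at index i, value v to place;
-- while the smaller child is < v, move it up; finally heap[i] = v.
-- (fuel = k is always enough: i at least doubles each iteration; the fuel-0
-- branch only makes the recursion total and is never reached.)
def pvSift : List Int → Int → Nat → Nat → Nat → List Int
  | heap, v, _, 0, i => heap.set i v
  | heap, v, k, fuel + 1, i =>
    if 2 * i + 1 < k then
      let c := if 2 * i + 2 < k ∧ heap.getD (2 * i + 2) 0 < heap.getD (2 * i + 1) 0
               then 2 * i + 2 else 2 * i + 1
      if heap.getD c 0 < v then pvSift (heap.set i (heap.getD c 0)) v k fuel c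
      else heap.set i v
    else heap.set i v

def sum_or_product_alt (arr : List Int) : Int :=
  let a := PySem.List.sorted arr (fun y => y) true
  (List.range a.length).foldl
    (fun best j =>
      let k := j + 1
      let heap := a.foldl (fun h x => pvSift h (h.getD 0 0 + x) k k 0)
        (List.replicate k (0 : Int))
      max best (heap.foldl (fun c i => c * i) 1)) 0

-- ===== PRECONDITION & SPEC =====
def Spec_sum_or_product (arr : List Int) (out : Int) : Prop := out = sum_or_product_alt arr
instance (arr : List Int) (out : Int) : Decidable (Spec_sum_or_product arr out) := by unfold Spec_sum_or_product; infer_instance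

-- ===== CLAIM (what is proved, stated in full; the proofs are below) =====
def Claim_equal_sum_or_product : Prop := ∀ (arr : List Int), Dom_sum_or_product arr → Spec_sum_or_product arr (sum_or_product arr)

-- ===== LEMMAS AND PROOFS =====

-- the heap property of Source B's array heap: every child is ≥ its parent
def pvIsHeap (h : List Int) : Prop :=
  ∀ j, 0 < j → j < h.length → h.getD ((j - 1) / 2) 0 ≤ h.getD j 0

-- ---- A-side: the dp loops are a map of independent per-partition folds ----
theorem pv_fold_set_map (f : List Int → List Int) :
    ∀ (n : Nat) (dp : List (List Int)), n ≤ dp.length →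
    (List.range n).foldl (fun d j => d.set j (f (d.getD j []))) dp
      = (dp.take n).map f ++ dp.drop n := by
  intro n
  induction n with
  | zero => intro dp _; simp
  | succ n ih =>
    intro dp hlen
    rw [List.range_succ, List.foldl_append, ih dp (by omega)]
    simp only [List.foldl_cons, List.foldl_nil]
    have hL : ((dp.take n).map f).length = n := by
      simp [List.length_take]; omega
    have hn : n < dp.length := by omega
    have hdrop : dp.drop n = dp[n] :: dp.drop (n + 1) := List.drop_eq_getElem_cons hn
    have htake : dp.take (n + 1) = dp.take n ++ [dp[n]] := by
      rw [List.take_add_one, List.getElem?_eq_getElem hn]; rfl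
    rw [hdrop, htake, List.map_append]
    have hgetD : (((dp.take n).map f) ++ dp[n] :: dp.drop (n + 1)).getD n [] = dp[n] := by
      rw [List.getD_eq_getElem?_getD, List.getElem?_append_right (by omega), hL]
      simp [List.getElem?_eq_getElem hn]
    rw [hgetD]
    rw [List.set_append_right _ _ (by omega), hL]
    simp
    rw [hdrop]
    rfl

theorem pv_outer_fold (l : List Int) :
    ∀ (n : Nat) (dp : List (List Int)), dp.length = n →
    l.foldl (fun dp x => (List.range n).foldl (fun d j => d.set j (pvStepA x (d.getD j []))) dp) dp
      = dp.map (fun d => l.foldl (fun d x => pvStepA x d) d) := by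
  induction l with
  | nil => intro n dp _; simp
  | cons x l ih =>
    intro n dp hlen
    simp only [List.foldl_cons]
    rw [pv_fold_set_map (pvStepA x) n dp (by omega)]
    subst hlen
    rw [List.take_length, List.drop_length, List.append_nil]
    rw [ih dp.length (dp.map (pvStepA x)) (by simp), List.map_map]
    rfl

theorem pv_step_pairwise (x : Int) (d : List Int) :
    (pvStepA x d).Pairwise (· ≤ ·) := by
  match d with
  | [] => exact List.Pairwise.nil
  | h :: t =>
    have := PySem.List.sorted_pairwise ((h + x) :: t) (fun y => y)
    simpa [pvStepA] using this

theorem pv_rep_pairwise (n : Nat) : (List.replicate n (0 : Int)).Pairwise (· ≤ ·) := by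
  induction n with
  | zero => exact List.Pairwise.nil
  | succ n ih =>
    rw [List.replicate_succ, List.pairwise_cons]
    exact ⟨fun b hb => le_of_eq (List.eq_of_mem_replicate hb).symm, ih⟩

theorem pv_step_length (x : Int) (d : List Int) : (pvStepA x d).length = d.length := by
  match d with
  | [] => rfl
  | h :: t => simp [pvStepA, PySem.List.length_sorted]

theorem pv_step_multiset (x : Int) (m : Int) (t : List Int) :
    (↑(pvStepA x (m :: t)) : Multiset Int) = ↑((m + x) :: t) := by
  simp only [pvStepA]
  exact Multiset.coe_eq_coe.mpr (PySem.List.sorted_perm ((m + x) :: t) (fun y => y) false)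

-- ---- B-side: sift-down facts ----
theorem pv_set_multiset (l : List Int) (i : Nat) (v : Int) (h : i < l.length) :
    (↑(l.set i v) : Multiset Int) + {l.getD i 0} = ↑l + {v} := by
  induction l generalizing i with
  | nil => simp at h
  | cons a t ih =>
    cases i with
    | zero =>
      simp only [List.set_cons_zero, List.getD_cons_zero, ← Multiset.cons_coe]
      simp [← Multiset.singleton_add]
      abel
    | succ i =>
      have hi : i < t.length := by simpa using h
      simp only [List.set_cons_succ, List.getD_cons_succ, ← Multiset.cons_coe,
        Multiset.cons_add]
      rw [ih i hi]

theorem pv_sift_length (v : Int) (k : Nat) :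
    ∀ (fuel : Nat) (heap : List Int) (i : Nat), (pvSift heap v k fuel i).length = heap.length := by
  intro fuel
  induction fuel with
  | zero => intro heap i; simp [pvSift]
  | succ fuel ih =>
    intro heap i
    rw [pvSift]
    by_cases h1 : 2 * i + 1 < k
    · simp only [h1, if_true]
      by_cases h3 : heap.getD (if 2 * i + 2 < k ∧ heap.getD (2 * i + 2) 0 < heap.getD (2 * i + 1) 0
               then 2 * i + 2 else 2 * i + 1) 0 < v
      · simp only [h3, if_true]
        rw [ih]; simp
      · simp only [h3, if_false]; simp
    · simp only [h1, if_false]; simp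

theorem pv_getD_set_ne (l : List Int) (i j : Nat) (v : Int) (h : i ≠ j) :
    (l.set i v).getD j 0 = l.getD j 0 := by
  simp [List.getD_eq_getElem?_getD, List.getElem?_set_ne h]

theorem pv_getD_set_self (l : List Int) (i : Nat) (v : Int) (h : i < l.length) :
    (l.set i v).getD i 0 = v := by
  simp [List.getD_eq_getElem?_getD, h]

theorem pv_sift_multiset (v : Int) (k : Nat) :
    ∀ (fuel : Nat) (heap : List Int) (i : Nat), heap.length = k → i < k →
    (↑(pvSift heap v k fuel i) : Multiset Int) + {heap.getD i 0} = ↑heap + {v} := by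
  intro fuel
  induction fuel with
  | zero =>
    intro heap i hlen hi
    exact pv_set_multiset heap i v (by omega)
  | succ fuel ih =>
    intro heap i hlen hi
    rw [pvSift]
    by_cases h1 : 2 * i + 1 < k
    · simp only [h1, if_true]
      set c := if 2 * i + 2 < k ∧ heap.getD (2 * i + 2) 0 < heap.getD (2 * i + 1) 0
               then 2 * i + 2 else 2 * i + 1 with hc
      have hck : c < k := by
        rw [hc]; split_ifs with h2 <;> omega
      have hic : i ≠ c := by
        rw [hc]; split_ifs with h2 <;> omega
      by_cases h3 : heap.getD c 0 < v
      · simp only [h3, if_true]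
        have hlen' : (heap.set i (heap.getD c 0)).length = k := by simp [hlen]
        have hgc : (heap.set i (heap.getD c 0)).getD c 0 = heap.getD c 0 :=
          pv_getD_set_ne heap i c _ hic
        have hIH := ih (heap.set i (heap.getD c 0)) c hlen' hck
        rw [hgc] at hIH
        have hset := pv_set_multiset heap i (heap.getD c 0) (by omega)
        -- combine: res + {heap[c]} = set + {v}; set + {heap[i]} = heap + {heap[c]}
        have key : (↑(pvSift (heap.set i (heap.getD c 0)) v k fuel c) : Multiset Int)
            + {heap.getD i 0} + {heap.getD c 0} = ↑heap + {v} + {heap.getD c 0} := by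
          calc (↑(pvSift (heap.set i (heap.getD c 0)) v k fuel c) : Multiset Int)
              + {heap.getD i 0} + {heap.getD c 0}
              = ↑(pvSift (heap.set i (heap.getD c 0)) v k fuel c)
                + {heap.getD c 0} + {heap.getD i 0} := by abel
            _ = ↑(heap.set i (heap.getD c 0)) + {v} + {heap.getD i 0} := by rw [hIH]
            _ = ↑(heap.set i (heap.getD c 0)) + {heap.getD i 0} + {v} := by abel
            _ = ↑heap + {heap.getD c 0} + {v} := by rw [hset]
            _ = ↑heap + {v} + {heap.getD c 0} := by abel
        exact add_right_cancel key
      · simp only [h3, if_false]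
        exact pv_set_multiset heap i v (by omega)
    · simp only [h1, if_false]
      exact pv_set_multiset heap i v (by omega)

-- sift-down restores the heap property, given it holds everywhere except at the hole i
theorem pv_sift_isHeap (v : Int) (k : Nat) :
    ∀ (fuel : Nat) (heap : List Int) (i : Nat), heap.length = k → i < k → k - i ≤ fuel →
    (∀ j, 0 < j → j < k → (j - 1) / 2 ≠ i → heap.getD ((j - 1) / 2) 0 ≤ heap.getD j 0) →
    (∀ j, 0 < j → j < k → (j - 1) / 2 = i → i ≠ 0 → heap.getD ((i - 1) / 2) 0 ≤ heap.getD j 0) →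
    (i ≠ 0 → heap.getD ((i - 1) / 2) 0 ≤ v) →
    pvIsHeap (pvSift heap v k fuel i) := by
  intro fuel
  induction fuel with
  | zero => intro heap i hlen hi hfuel; omega
  | succ fuel ih =>
    intro heap i hlen hi hfuel Ha Hb Hc
    rw [pvSift]
    by_cases h1 : 2 * i + 1 < k
    · simp only [h1, if_true]
      set c := if 2 * i + 2 < k ∧ heap.getD (2 * i + 2) 0 < heap.getD (2 * i + 1) 0
               then 2 * i + 2 else 2 * i + 1 with hc
      have hck : c < k := by
        rw [hc]; split_ifs with h2 <;> omega
      have hcgt : 2 * i + 1 ≤ c := by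
        rw [hc]; split_ifs with h2 <;> omega
      have hcle : c ≤ 2 * i + 2 := by
        rw [hc]; split_ifs with h2 <;> omega
      -- c is the minimal child of i
      have hcmin : ∀ j, 0 < j → j < k → (j - 1) / 2 = i → heap.getD c 0 ≤ heap.getD j 0 := by
        intro j hj0 hjk hpj
        have hj : j = 2 * i + 1 ∨ j = 2 * i + 2 := by omega
        by_cases h2 : 2 * i + 2 < k ∧ heap.getD (2 * i + 2) 0 < heap.getD (2 * i + 1) 0
        · have hce : c = 2 * i + 2 := by rw [hc, if_pos h2]
          rcases hj with rfl | rfl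
          · rw [hce]; exact le_of_lt h2.2
          · rw [hce]
        · have hce : c = 2 * i + 1 := by rw [hc, if_neg h2]
          rcases hj with rfl | rfl
          · rw [hce]
          · rw [hce]
            rcases (not_and_or.mp h2) with h3 | h3
            · omega
            · exact le_of_not_gt (by simpa using h3)
      by_cases h3 : heap.getD c 0 < v
      · simp only [h3, if_true]
        have hlen' : (heap.set i (heap.getD c 0)).length = k := by simp [hlen]
        have hci : i ≠ c := by omega
        apply ih (heap.set i (heap.getD c 0)) c hlen' hck (by omega)
        · -- Ha' : pairs with parent ≠ c
          intro j hj0 hjk hpj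
          by_cases hpi : (j - 1) / 2 = i
          · -- parent is i, whose value is now heap[c]
            rw [hpi, pv_getD_set_self heap i (heap.getD c 0) (by omega)]
            have hji : j ≠ i := by omega
            rw [pv_getD_set_ne heap i j _ (fun h => hji h.symm)]
            exact hcmin j hj0 hjk hpi
          · rw [pv_getD_set_ne heap i _ _ (fun h => hpi h.symm)]
            by_cases hji : j = i
            · subst hji
              rw [pv_getD_set_self heap j (heap.getD c 0) (by omega)]
              have hj0' : j ≠ 0 := by omega
              exact Hb c (by omega) hck (by omega) hj0'
            · rw [pv_getD_set_ne heap i j _ (fun h => hji h.symm)]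
              exact Ha j hj0 hjk hpi
        · -- Hb' : children of c vs parent of c (= i, value heap[c])
          intro j hj0 hjk hpj _
          have hpc : (c - 1) / 2 = i := by omega
          rw [hpc, pv_getD_set_self heap i (heap.getD c 0) (by omega)]
          have hji : j ≠ i := by omega
          rw [pv_getD_set_ne heap i j _ (fun h => hji h.symm)]
          have := Ha j hj0 hjk (by omega)
          rwa [hpj] at this
        · -- Hc' : parent of c (= i) ≤ v
          intro _
          have hpc : (c - 1) / 2 = i := by omega
          rw [hpc, pv_getD_set_self heap i (heap.getD c 0) (by omega)]
          exact le_of_lt h3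
      · -- break: children of i are ≥ v
        simp only [h3, if_false]
        intro j hj0 hjk'
        have hjk : j < k := by
          have := pv_sift_length v k 0 heap i
          simp at hjk'
          omega
        by_cases hpi : (j - 1) / 2 = i
        · rw [hpi, pv_getD_set_self heap i v (by omega)]
          have hji : j ≠ i := by omega
          rw [pv_getD_set_ne heap i j _ (fun h => hji h.symm)]
          exact le_trans (le_of_not_gt (by simpa using h3)) (hcmin j hj0 hjk hpi)
        · rw [pv_getD_set_ne heap i _ _ (fun h => hpi h.symm)]
          by_cases hji : j = i
          · subst hji
            rw [pv_getD_set_self heap j v (by omega)]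
            exact Hc (by omega)
          · rw [pv_getD_set_ne heap i j _ (fun h => hji h.symm)]
            exact Ha j hj0 hjk hpi
    · -- no children: i is a leaf
      simp only [h1, if_false]
      intro j hj0 hjk'
      have hjk : j < k := by simp at hjk'; omega
      by_cases hpi : (j - 1) / 2 = i
      · omega
      · rw [pv_getD_set_ne heap i _ _ (fun h => hpi h.symm)]
        by_cases hji : j = i
        · subst hji
          rw [pv_getD_set_self heap j v (by omega)]
          exact Hc (by omega)
        · rw [pv_getD_set_ne heap i j _ (fun h => hji h.symm)]
          exact Ha j hj0 hjk hpi

theorem pv_sift_isHeap_root (v : Int) (k : Nat) (heap : List Int)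
    (hlen : heap.length = k) (hk : 0 < k) (hh : pvIsHeap heap) :
    pvIsHeap (pvSift heap v k k 0) := by
  apply pv_sift_isHeap v k k heap 0 hlen hk (by omega)
  · intro j hj0 hjk _
    exact hh j hj0 (by omega)
  · intro j _ _ _ h; omega
  · intro h; omega

-- the root of a heap is ≤ every element
theorem pv_root_min (h : List Int) (hh : pvIsHeap h) :
    ∀ j, j < h.length → h.getD 0 0 ≤ h.getD j 0 := by
  intro j
  induction j using Nat.strong_induction_on with
  | _ j ih =>
    intro hj
    cases Nat.eq_zero_or_pos j with
    | inl h0 => subst h0; rfl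
    | inr h0 =>
      exact le_trans (ih ((j - 1) / 2) (by omega) (by omega)) (hh j h0 hj)

-- if the heap holds the same multiset as a nonempty sorted list, the root is its head
theorem pv_root_eq_head (m : Int) (t : List Int) (heap : List Int)
    (hs : (m :: t).Pairwise (· ≤ ·)) (hh : pvIsHeap heap)
    (hm : (↑heap : Multiset Int) = ↑(m :: t)) :
    heap.getD 0 0 = m := by
  have hperm : heap.Perm (m :: t) := Multiset.coe_eq_coe.mp hm
  have hlen : heap.length = t.length + 1 := by simpa using hperm.length_eq
  have h0 : 0 < heap.length := by omega
  have hroot_mem : heap.getD 0 0 ∈ heap := by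
    rw [List.getD_eq_getElem heap 0 h0]
    exact List.getElem_mem h0
  have hmin_mt : ∀ y ∈ m :: t, m ≤ y := by
    intro y hy
    rcases List.mem_cons.mp hy with rfl | hy'
    · rfl
    · exact (List.pairwise_cons.mp hs).1 y hy'
  apply le_antisymm
  · -- root ≤ m : m is somewhere in heap
    have hm_mem : m ∈ heap := hperm.mem_iff.mpr (List.mem_cons_self)
    obtain ⟨i, hi, hie⟩ := List.getElem_of_mem hm_mem
    have := pv_root_min heap hh i hi
    rwa [List.getD_eq_getElem heap 0 hi, hie] at this
  · exact hmin_mt _ (hperm.mem_iff.mp hroot_mem)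

-- ---- the per-partition folds agree (as multisets of bucket sums) ----
theorem pv_fold_k (k : Nat) (hk : 0 < k) (l : List Int) :
    ∀ (d heap : List Int), d.Pairwise (· ≤ ·) → d.length = k → heap.length = k →
    pvIsHeap heap → (↑heap : Multiset Int) = ↑d →
    (↑(l.foldl (fun h x => pvSift h (h.getD 0 0 + x) k k 0) heap) : Multiset Int)
      = ↑(l.foldl (fun d x => pvStepA x d) d) := by
  induction l with
  | nil => intro d heap _ _ _ _ hm; simpa using hm
  | cons x l ih =>
    intro d heap hd hdl hhl hh hm
    obtain ⟨m, t, rfl⟩ : ∃ m t, d = m :: t := by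
      cases d with
      | nil => simp at hdl; omega
      | cons m t => exact ⟨m, t, rfl⟩
    simp only [List.foldl_cons]
    have hroot : heap.getD 0 0 = m := pv_root_eq_head m t heap hd hh hm
    apply ih
    · exact pv_step_pairwise x (m :: t)
    · rw [pv_step_length]; exact hdl
    · rw [pv_sift_length]; exact hhl
    · exact pv_sift_isHeap_root _ k heap hhl hk hh
    · -- multisets evolve identically: a minimum is replaced by minimum + x
      rw [pv_step_multiset]
      have hms := pv_sift_multiset (heap.getD 0 0 + x) k k heap 0 hhl hk
      rw [hroot] at hms
      have : (↑(pvSift heap (m + x) k k 0) : Multiset Int) + {m}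
          = (↑((m + x) :: t) : Multiset Int) + {m} := by
        rw [hms, hm]
        simp only [← Multiset.cons_coe, ← Multiset.singleton_add]
        abel
      rw [hroot]
      exact add_right_cancel this

-- products of permuted lists agree
theorem pv_prod_perm (l1 l2 : List Int) (h : l1.Perm l2) :
    l1.foldl (fun c i => c * i) 1 = l2.foldl (fun c i => c * i) 1 := by
  have h1 : l1.foldl (fun c i => c * i) 1 = l1.prod := (List.prod_eq_foldl).symm
  have h2 : l2.foldl (fun c i => c * i) 1 = l2.prod := (List.prod_eq_foldl).symm
  rw [h1, h2, h.prod_eq]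

theorem pv_rep_isHeap (k : Nat) : pvIsHeap (List.replicate k (0 : Int)) := by
  intro j hj0 hjk
  have hjl : j < k := by simpa using hjk
  rw [List.getD_eq_getElem _ 0 (by simp; omega),
      List.getD_eq_getElem _ 0 (by simpa using hjl)]
  simp

-- ===== VERDICT (by name: the statement is the Claim_ definition above) =====
theorem sum_or_product_spec : Claim_equal_sum_or_product := by
  intro arr _
  unfold Spec_sum_or_product sum_or_product sum_or_product_alt
  simp only
  rw [pv_outer_fold _ _ _ (by simp)]
  rw [List.map_map, List.foldl_map]
  apply congrArg (fun f => List.foldl f (0 : Int) (List.range (PySem.List.sorted arr (fun y => y) true).length))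
  funext best j
  simp only [Function.comp]
  have hperm : ((PySem.List.sorted arr (fun y => y) true).foldl
      (fun h x => pvSift h (h.getD 0 0 + x) (j + 1) (j + 1) 0) (List.replicate (j + 1) (0 : Int))).Perm
      ((PySem.List.sorted arr (fun y => y) true).foldl (fun d x => pvStepA x d)
        (List.replicate (j + 1) (0 : Int))) := by
    apply Multiset.coe_eq_coe.mp
    exact pv_fold_k (j + 1) (by omega) _ _ _ (pv_rep_pairwise (j + 1)) (by simp) (by simp)
      (pv_rep_isHeap (j + 1)) rfl
  rw [pv_prod_perm _ _ hperm]
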